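-- pv_equiv track=rewrite | github.com/nrhys2005/slack-bot | slack_bot/db_query.py | _convert_md_tables_to_code_blocks
-- ===== SOURCE A (Python) =====
-- def _convert_md_tables_to_code_blocks(text: str) -> str:
--     """마크다운 테이블(|...|)을 Slack에서 보기 좋은 코드 블록으로 변환."""
--     lines = text.split("\n")
--     result: list[str] = []
--     table_lines: list[str] = []
--     in_table = False
--
--     for line in lines:
--         stripped = line.strip()
--         is_table_line = stripped.startswith("|") and stripped.endswith("|")
--
--         if is_table_line:
--             if not in_table:
--                 in_table = True
--                 table_lines = []
--             table_lines.append(stripped)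
--         else:
--             if in_table:
--                 result.append(_format_table(table_lines))
--                 in_table = False
--                 table_lines = []
--             result.append(line)
--
--     if in_table:
--         result.append(_format_table(table_lines))
--
--     return "\n".join(result)
--
-- def _format_table(table_lines: list[str]) -> str:
--     """파이프 테이블 행들을 정렬된 코드 블록 텍스트로 변환."""
--     # 구분선(|---|---|) 제거
--     rows: list[list[str]] = []
--     for line in table_lines:
--         cells = [c.strip() for c in line.strip("|").split("|")]
--         # 구분선 판별: 모든 셀이 ---만으로 구성
--         if all(set(c) <= {"-", ":"} and len(c) > 0 for c in cells):
--             continue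
--         rows.append(cells)
--
--     if not rows:
--         return ""
--
--     # 각 컬럼 최대 너비 계산
--     col_count = max(len(r) for r in rows)
--     widths = [0] * col_count
--     for row in rows:
--         for i, cell in enumerate(row):
--             widths[i] = max(widths[i], len(cell))
--
--     # 정렬된 텍스트 생성
--     formatted: list[str] = []
--     for idx, row in enumerate(rows):
--         parts = []
--         for i in range(col_count):
--             cell = row[i] if i < len(row) else ""
--             parts.append(cell.ljust(widths[i]))
--         formatted.append("  ".join(parts))
--         # 헤더 아래 구분선
--         if idx == 0:
--             formatted.append("  ".join("-" * w for w in widths))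
--
--     return "```\n" + "\n".join(formatted) + "\n```"
-- ===== SOURCE B (Python) =====
-- # B: segment arithmetic instead of a state machine -- compute table-run boundary indices
-- # (starts/ends) over the whole line list, then stitch output from slices; tables are
-- # rendered column-major (transpose, per-column padding) instead of row-major width updates.
--
-- def _is_row(line: str) -> bool:
--     s = line.strip()
--     return s.startswith("|") and s.endswith("|")
--
--
-- def _format_table(table_lines: list[str]) -> str:
--     grid = [[c.strip() for c in line.strip("|").split("|")] for line in table_lines]
--     # keep a row unless every cell is a nonempty run of '-'/':' (a separator row)
--     rows = [r for r in grid
--             if any(c == "" or any(ch not in "-:" for ch in c) for c in r)]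
--     if not rows:
--         return ""
--     # transpose to columns (short rows padded with ""), pad each column to its width
--     cols = [[r[i] if i < len(r) else "" for r in rows]
--             for i in range(max(len(r) for r in rows))]
--     widths = [max(len(c) for c in col) for col in cols]
--     padded = [[c.ljust(w) for c in col] for col, w in zip(cols, widths)]
--     body = ["  ".join(t) for t in zip(*padded)]
--     sep = "  ".join("-" * w for w in widths)
--     return "```\n" + "\n".join([body[0], sep] + body[1:]) + "\n```"
--
--
-- def _convert_md_tables_to_code_blocks(text: str) -> str:
--     lines = text.split("\n")
--     n = len(lines)
--     flags = [_is_row(l) for l in lines]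
--     starts = [i for i in range(n) if flags[i] and (i == 0 or not flags[i - 1])]
--     ends = [i for i in range(n) if flags[i] and (i == n - 1 or not flags[i + 1])]
--     out: list[str] = []
--     prev = 0
--     for s, e in zip(starts, ends):
--         out += lines[prev:s]
--         out.append(_format_table([l.strip() for l in lines[s:e + 1]]))
--         prev = e + 1
--     out += lines[prev:]
--     return "\n".join(out)
-- ===== Notes on version B (the rewrite author's own statement) =====
-- stated objective: alternative
-- what changed: Replaces A's per-line in_table/table_lines state machine (with EOF flush) by segment arithmetic: table-run start/end indices are computed over the whole line list and the output is stitched from slices; each table is rendered column-major (transpose to columns, per-column max/padding, zip back) instead of A's row-major loop with an in-place width array, and separator rows are detected by an existential character test instead of set algebra.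
import Mathlib
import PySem

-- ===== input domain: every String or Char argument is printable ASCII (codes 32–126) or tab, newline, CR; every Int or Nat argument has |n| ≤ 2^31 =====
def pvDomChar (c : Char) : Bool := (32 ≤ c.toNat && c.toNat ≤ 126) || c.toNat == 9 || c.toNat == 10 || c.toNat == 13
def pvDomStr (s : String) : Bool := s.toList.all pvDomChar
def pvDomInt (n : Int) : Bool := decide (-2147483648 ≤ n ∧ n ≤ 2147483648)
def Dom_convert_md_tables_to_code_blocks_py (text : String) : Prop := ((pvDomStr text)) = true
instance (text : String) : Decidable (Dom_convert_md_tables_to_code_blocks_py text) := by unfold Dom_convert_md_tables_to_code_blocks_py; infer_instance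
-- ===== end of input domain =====

-- B replaces A's in_table/table_lines state machine by computing the table-run boundary indices
-- (starts/ends) over the whole line list and stitching the output from slices, and renders each
-- table column-major (transpose + per-column padding) instead of row-major in-place width updates;
-- same return value (objective: alternative).

-- str.ljust(w) for a list of chars: pad on the right with spaces up to width w (exact: no-op when already ≥ w)
def pvLjust (cs : List Char) (w : Nat) : List Char := cs ++ List.replicate (w - cs.length) ' '

-- ===== PORT A =====
-- A's helper _format_table, on lines as List Char ("range(col_count)" ported as List.range, exact for a Nat count)
def pvA_format (table_lines : List (List Char)) : List Char :=
  let rows := table_lines.foldl (fun rows line =>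
    let cells := (PySem.Chars.splitOn (PySem.Chars.stripChars line ['|']) ['|']).map PySem.Chars.strip
    if cells.all (fun c => PySem.Set.issubset (PySem.Set.ofList c) ['-', ':'] && c.length > 0) then rows
    else rows ++ [cells]) []
  if rows = [] then []
  else
    let col_count := (PySem.List.max? (rows.map (fun r => r.length)) (fun x => x)).getD 0
    let widths := rows.foldl (fun widths row =>
      row.zipIdx.foldl (fun ws ci => ws.set ci.2 (max (ws.getD ci.2 0) ci.1.length)) widths)
      (List.replicate col_count 0)
    let formatted := rows.zipIdx.foldl (fun formatted ri =>
      let parts := (List.range col_count).foldl (fun parts i =>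
        let cell := if i < ri.1.length then ri.1.getD i [] else []
        parts ++ [pvLjust cell (widths.getD i 0)]) []
      let formatted := formatted ++ [PySem.Chars.join [' ', ' '] parts]
      if ri.2 = 0 then formatted ++ [PySem.Chars.join [' ', ' '] (widths.map (fun w => List.replicate w '-'))]
      else formatted) []
    ['`','`','`','\n'] ++ PySem.Chars.join ['\n'] formatted ++ ['\n','`','`','`']

def convert_md_tables_to_code_blocks_py (text : String) : String :=
  let lines := PySem.Chars.splitOn text.toList ['\n']
  let st := lines.foldl (fun (st : List (List Char) × List (List Char) × Bool) line =>
    let stripped := PySem.Chars.strip line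
    let is_table_line := PySem.Chars.startswith stripped ['|'] && PySem.Chars.endswith stripped ['|']
    if is_table_line then
      let table_lines := if !st.2.2 then [] else st.2.1
      (st.1, table_lines ++ [stripped], true)
    else
      if st.2.2 then (st.1 ++ [pvA_format st.2.1] ++ [line], [], false)
      else (st.1 ++ [line], st.2.1, false)) ([], [], false)
  let result := if st.2.2 then st.1 ++ [pvA_format st.2.1] else st.1
  String.ofList (PySem.Chars.join ['\n'] result)

-- ===== PORT B =====
def pvB_isRow (line : List Char) : Bool :=
  let s := PySem.Chars.strip line
  PySem.Chars.startswith s ['|'] && PySem.Chars.endswith s ['|']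

-- zip(*cols) on lists: hand port, exact (zip of k iterables truncates to the shortest; zip() of none yields nothing)
def pvZipAll {α : Type} : List (List α) → List (List α)
  | [] => []
  | [c] => c.map (fun x => [x])
  | c :: cs => (c.zip (pvZipAll cs)).map (fun p => p.1 :: p.2)

-- B's _format_table: transpose to columns, pad column-wise, zip back into body lines
def pvB_format (table_lines : List (List Char)) : List Char :=
  let grid := table_lines.map (fun line =>
    (PySem.Chars.splitOn (PySem.Chars.stripChars line ['|']) ['|']).map PySem.Chars.strip)
  let rows := grid.filter (fun r => r.any (fun c =>
    c.isEmpty || c.any (fun ch => !(ch == '-' || ch == ':'))))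
  if rows = [] then []
  else
    let cols := (List.range ((PySem.List.max? (rows.map (fun r => r.length)) (fun x => x)).getD 0)).map
      (fun i => rows.map (fun r => if i < r.length then r.getD i [] else []))
    -- max(len(c) for c in col): col is nonempty (rows ≠ []), so max? is some and the getD default is never used
    let widths := cols.map (fun col => (PySem.List.max? (col.map (fun c => c.length)) (fun x => x)).getD 0)
    let padded := (cols.zip widths).map (fun cw => cw.1.map (fun c => pvLjust c cw.2))
    let body := (pvZipAll padded).map (fun t => PySem.Chars.join [' ', ' '] t)
    let sep := PySem.Chars.join [' ', ' '] (widths.map (fun w => List.replicate w '-'))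
    match body with
    | [] => []  -- unreachable: rows ≠ [] and each kept row has a cell
    | b0 :: rest => ['`','`','`','\n'] ++ PySem.Chars.join ['\n'] (b0 :: sep :: rest) ++ ['\n','`','`','`']

-- the two boundary comprehensions of Source B ("flags[i]" etc. indexed within range, ported with getD)
def pvStarts (flags : List Bool) : List Nat :=
  (List.range flags.length).filter (fun i => flags.getD i false && (i == 0 || !flags.getD (i - 1) false))

def pvEnds (flags : List Bool) : List Nat :=
  (List.range flags.length).filter (fun i =>
    flags.getD i false && (i == flags.length - 1 || !flags.getD (i + 1) false))

def convert_md_tables_to_code_blocks_py_alt (text : String) : String :=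
  let lines := PySem.Chars.splitOn text.toList ['\n']
  let flags := lines.map pvB_isRow
  let starts := pvStarts flags
  let ends := pvEnds flags
  let st := (starts.zip ends).foldl (fun (st : List (List Char) × Nat) se =>
      (st.1 ++ PySem.List.slice lines (some (st.2 : Int)) (some (se.1 : Int))
            ++ [pvB_format ((PySem.List.slice lines (some (se.1 : Int)) (some ((se.2 : Int) + 1))).map PySem.Chars.strip)],
       se.2 + 1)) ([], 0)
  let out := st.1 ++ PySem.List.slice lines (some (st.2 : Int)) none
  String.ofList (PySem.Chars.join ['\n'] out)

-- ===== PRECONDITION & SPEC =====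
def Spec_convert_md_tables_to_code_blocks_py (text : String) (out : String) : Prop := out = convert_md_tables_to_code_blocks_py_alt text
instance (text : String) (out : String) : Decidable (Spec_convert_md_tables_to_code_blocks_py text out) := by unfold Spec_convert_md_tables_to_code_blocks_py; infer_instance

-- ===== CLAIM (what is proved, stated in full; the proofs are below) =====
def Claim_equal_convert_md_tables_to_code_blocks_py : Prop := ∀ (text : String), Dom_convert_md_tables_to_code_blocks_py text → Spec_convert_md_tables_to_code_blocks_py text (convert_md_tables_to_code_blocks_py text)

-- ===== LEMMAS AND PROOFS =====

-- run decomposition (proof-only): first maximal run of table lines, and the common recursion both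
-- top levels are reduced to
def pvRun : List (List Char) → List (List Char) × List (List Char)
  | [] => ([], [])
  | l :: ls =>
    if pvB_isRow l then
      let p := pvRun ls
      (l :: p.1, p.2)
    else ([], l :: ls)

theorem pvRun_rest_le (ls : List (List Char)) : (pvRun ls).2.length ≤ ls.length := by
  induction ls with
  | nil => simp [pvRun]
  | cons l ls ih =>
    simp only [pvRun]
    split
    · simpa using Nat.le_succ_of_le ih
    · simp

def pvGo (lines : List (List Char)) : List (List Char) :=
  match lines with
  | [] => []
  | l :: ls =>
    if pvB_isRow l then
      pvB_format ((l :: (pvRun ls).1).map PySem.Chars.strip) :: pvGo (pvRun ls).2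
    else l :: pvGo ls
termination_by lines.length
decreasing_by
  · have := pvRun_rest_le ls; simp; omega
  · simp

theorem pvRun_append (ls : List (List Char)) : (pvRun ls).1 ++ (pvRun ls).2 = ls := by
  induction ls with
  | nil => simp [pvRun]
  | cons l ls ih => simp only [pvRun]; split <;> simp [ih]

theorem pvRun_all (ls : List (List Char)) : ∀ x ∈ (pvRun ls).1, pvB_isRow x = true := by
  induction ls with
  | nil => simp [pvRun]
  | cons l ls ih =>
    simp only [pvRun]
    split
    · next h => intro x hx; rcases List.mem_cons.1 hx with rfl | hx; exact h; exact ih x hx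
    · simp

theorem pvRun_head (ls : List (List Char)) : ((pvRun ls).2.map pvB_isRow).getD 0 false = false := by
  induction ls with
  | nil => simp [pvRun]
  | cons l ls ih =>
    simp only [pvRun]
    split
    · exact ih
    · next h => simpa using h

-- ---------- formatter equivalence ----------

theorem pv_keep_pred_cell (c : List Char) :
    (!(PySem.Set.issubset (PySem.Set.ofList c) ['-', ':'] && decide (c.length > 0)))
    = (c.isEmpty || c.any (fun ch => !(ch == '-' || ch == ':'))) := by
  by_cases hc : c = []
  · subst hc; decide
  · rw [Bool.eq_iff_iff]
    simp only [Bool.not_eq_true', Bool.and_eq_false_iff, List.isEmpty_iff, hc, false_or,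
      Bool.or_eq_true, List.any_eq_true, decide_eq_false_iff_not, Nat.not_lt, Nat.le_zero,
      List.length_eq_zero_iff, or_false]
    rw [← Bool.not_eq_true, not_congr (PySem.Set.issubset_iff _ _)]
    push Not
    simp [PySem.Set.mem_ofList, not_or]

theorem pv_keep_pred (cells : List (List Char)) :
    (!(cells.all (fun c => PySem.Set.issubset (PySem.Set.ofList c) ['-', ':'] && decide (c.length > 0))))
    = cells.any (fun c => c.isEmpty || c.any (fun ch => !(ch == '-' || ch == ':'))) := by
  rw [List.not_all_eq_any_not]
  exact PySem.List.any_congr_mem (fun c _ => pv_keep_pred_cell c)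

theorem pv_foldl_skip_append {α β : Type} (g : α → List β) (p : β → Bool) :
    ∀ (tl : List α) (acc : List (List β)),
    tl.foldl (fun rows line => if (g line).all p then rows else rows ++ [g line]) acc
    = acc ++ (tl.map g).filter (fun cells => !(cells.all p)) := by
  intro tl
  induction tl with
  | nil => simp
  | cons l tl ih =>
    intro acc
    rw [List.foldl_cons, List.map_cons, List.filter_cons]
    by_cases h : (g l).all p
    · rw [if_pos h, ih]; simp [h]
    · rw [if_neg h, ih]; simp [h]

theorem pv_rows_eq (tl : List (List Char)) :
    tl.foldl (fun rows line =>
      let cells := (PySem.Chars.splitOn (PySem.Chars.stripChars line ['|']) ['|']).map PySem.Chars.strip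
      if cells.all (fun c => PySem.Set.issubset (PySem.Set.ofList c) ['-', ':'] && c.length > 0) then rows
      else rows ++ [cells]) []
    = (tl.map (fun line =>
        (PySem.Chars.splitOn (PySem.Chars.stripChars line ['|']) ['|']).map PySem.Chars.strip)).filter
        (fun r => r.any (fun c => c.isEmpty || c.any (fun ch => !(ch == '-' || ch == ':')))) := by
  have := pv_foldl_skip_append
    (fun line => (PySem.Chars.splitOn (PySem.Chars.stripChars line ['|']) ['|']).map PySem.Chars.strip)
    (fun c => PySem.Set.issubset (PySem.Set.ofList c) ['-', ':'] && decide (c.length > 0)) tl []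
  simp only [List.nil_append] at this
  rw [this]
  exact List.filter_congr (fun x _ => pv_keep_pred x)

theorem pv_upd_length : ∀ (r : List (List Char)) (k : Nat) (ws : List Nat),
    ((r.zipIdx k).foldl (fun ws ci => ws.set ci.2 (max (ws.getD ci.2 0) ci.1.length)) ws).length = ws.length := by
  intro r
  induction r with
  | nil => simp
  | cons c r ih => intro k ws; rw [List.zipIdx_cons, List.foldl_cons, ih]; simp

theorem pv_upd_getD : ∀ (r : List (List Char)) (k : Nat) (ws : List Nat) (i : Nat),
    r.length + k ≤ ws.length →
    ((r.zipIdx k).foldl (fun ws ci => ws.set ci.2 (max (ws.getD ci.2 0) ci.1.length)) ws).getD i 0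
    = if k ≤ i ∧ i < k + r.length then max (ws.getD i 0) ((r.getD (i - k) []).length) else ws.getD i 0 := by
  intro r
  induction r with
  | nil => intro k ws i h; simp
  | cons c r ih =>
    intro k ws i h
    rw [List.zipIdx_cons, List.foldl_cons]
    rw [ih (k+1) _ i (by simp at h ⊢; omega)]
    by_cases h1 : k + 1 ≤ i ∧ i < k + 1 + r.length
    · rw [if_pos h1, if_pos (by simp; omega)]
      have hne : i ≠ k := by omega
      have : (ws.set k (max (ws.getD k 0) c.length)).getD i 0 = ws.getD i 0 := by
        simp [List.getD, List.getElem?_set_ne (Ne.symm hne)]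
      rw [this]
      congr 1
      have : i - k = (i - (k+1)) + 1 := by omega
      rw [this]
      simp
    · rw [if_neg h1]
      by_cases h2 : i = k
      · subst h2
        rw [if_pos (by simp only [List.length_cons]; omega)]
        have hk : i < ws.length := by simp only [List.length_cons] at h; omega
        simp [List.getD, hk]
      · rw [if_neg (by simp only [List.length_cons]; omega)]
        simp [List.getD, List.getElem?_set_ne (Ne.symm h2)]

theorem pv_WA_eq : ∀ (rows : List (List (List Char))) (ws : List Nat),
    (∀ r ∈ rows, r.length ≤ ws.length) →
    rows.foldl (fun widths row =>
      (row.zipIdx.foldl (fun ws ci => ws.set ci.2 (max (ws.getD ci.2 0) ci.1.length)) widths)) ws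
    = (List.range ws.length).map (fun i =>
        rows.foldl (fun a r => if i < r.length then max a ((r.getD i []).length) else a) (ws.getD i 0)) := by
  intro rows
  induction rows with
  | nil =>
    intro ws _
    apply List.ext_getElem
    · simp
    · intro i h1 h2
      simp only [List.getElem_map, List.getElem_range, List.foldl_nil, List.getD]
      rw [List.getElem?_eq_getElem (by simpa using h1)]
      rfl
  | cons r rows ih =>
    intro ws h
    rw [List.foldl_cons]
    rw [ih _ (by intro r' hr'; rw [pv_upd_length]; exact h r' (List.mem_cons_of_mem _ hr'))]
    rw [pv_upd_length]
    apply List.map_congr_left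
    intro i hi
    rw [List.mem_range] at hi
    rw [List.foldl_cons]
    congr 1
    rw [pv_upd_getD r 0 ws i (by simpa using h r List.mem_cons_self)]
    by_cases h1 : i < r.length
    · rw [if_pos (by omega), if_pos h1]; simp
    · rw [if_neg (by omega), if_neg h1]

theorem pv_formatted_aux (f : List (List Char) → List Char) (sepLine : List Char) :
    ∀ (rest : List (List (List Char))) (k : Nat) (acc : List (List Char)), 0 < k →
    ((rest.zipIdx k).foldl (fun formatted ri =>
      let formatted := formatted ++ [f ri.1]
      if ri.2 = 0 then formatted ++ [sepLine] else formatted) acc)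
    = acc ++ rest.map f := by
  intro rest
  induction rest with
  | nil => simp
  | cons r rest ih =>
    intro k acc hk
    rw [List.zipIdx_cons, List.foldl_cons]
    simp only [Nat.pos_iff_ne_zero.mp hk, if_neg (Nat.pos_iff_ne_zero.mp hk)]
    rw [ih (k+1) _ (by omega)]
    simp

theorem pv_formatted_eq (f : List (List Char) → List Char) (sepLine : List Char)
    (r0 : List (List Char)) (rest : List (List (List Char))) :
    (((r0 :: rest).zipIdx).foldl (fun formatted ri =>
      let formatted := formatted ++ [f ri.1]
      if ri.2 = 0 then formatted ++ [sepLine] else formatted) [])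
    = f r0 :: sepLine :: rest.map f := by
  rw [List.zipIdx_cons, List.foldl_cons]
  simp only [if_pos rfl]
  rw [pv_formatted_aux f sepLine rest 1 _ (by omega)]
  simp

theorem pv_transpose {α β ρ : Type} :
    ∀ (ks : List β), ks ≠ [] → ∀ (rows : List ρ) (g : β → ρ → α),
    pvZipAll (ks.map (fun i => rows.map (g i))) = rows.map (fun r => ks.map (fun i => g i r)) := by
  intro ks
  induction ks with
  | nil => intro h; exact absurd rfl h
  | cons i ks ih =>
    intro _ rows g
    cases ks with
    | nil => simp [pvZipAll, List.map_map]
    | cons j ks' =>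
      rw [List.map_cons]
      rw [show pvZipAll (rows.map (g i) :: (j :: ks').map (fun i => rows.map (g i)))
          = ((rows.map (g i)).zip (pvZipAll ((j :: ks').map (fun i => rows.map (g i))))).map (fun p => p.1 :: p.2) from rfl]
      rw [ih (by simp) rows g, List.zip_map']
      simp

theorem pv_formatted_concrete (cc : Nat) (widths : List Nat) (sepLine : List Char)
    (r0 : List (List Char)) (rest : List (List (List Char))) :
    ((r0 :: rest).zipIdx.foldl (fun formatted ri =>
      if ri.2 = 0 then formatted ++ [PySem.Chars.join [' ', ' '] (List.map (fun x => pvLjust (if x < ri.1.length then ri.1.getD x [] else []) (widths.getD x 0)) (List.range cc))] ++ [sepLine]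
      else formatted ++ [PySem.Chars.join [' ', ' '] (List.map (fun x => pvLjust (if x < ri.1.length then ri.1.getD x [] else []) (widths.getD x 0)) (List.range cc))]) [])
    = PySem.Chars.join [' ', ' '] (List.map (fun x => pvLjust (if x < r0.length then r0.getD x [] else []) (widths.getD x 0)) (List.range cc)) :: sepLine :: rest.map (fun row => PySem.Chars.join [' ', ' '] (List.map (fun x => pvLjust (if x < row.length then row.getD x [] else []) (widths.getD x 0)) (List.range cc))) :=
  pv_formatted_eq (fun row => PySem.Chars.join [' ', ' '] (List.map (fun x => pvLjust (if x < row.length then row.getD x [] else []) (widths.getD x 0)) (List.range cc))) sepLine r0 rest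

theorem pv_col_w (r0 : List (List Char)) (rest : List (List (List Char))) (i : Nat) :
    (PySem.List.max? (((r0 :: rest).map (fun r => if i < r.length then r.getD i [] else [])).map (fun c => c.length)) (fun x => x)).getD 0
    = (r0 :: rest).foldl (fun a r => if i < r.length then max a ((r.getD i []).length) else a) 0 := by
  rw [List.map_cons, List.map_cons, PySem.List.max?_id_cons, Option.getD_some, List.foldl_map,
    List.foldl_cons, List.foldl_map]
  have h0 : (if i < r0.length then r0.getD i [] else []).length
      = (if i < r0.length then max 0 ((r0.getD i []).length) else 0) := by
    split <;> simp
  rw [h0]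
  apply List.foldl_ext
  intro b r _
  split <;> simp

theorem pv_format_eq (tl : List (List Char)) : pvA_format tl = pvB_format tl := by
  simp only [pvA_format, pvB_format]
  rw [pv_rows_eq]
  generalize hrows : ((tl.map (fun line =>
      (PySem.Chars.splitOn (PySem.Chars.stripChars line ['|']) ['|']).map PySem.Chars.strip)).filter
      (fun r => r.any (fun c => c.isEmpty || c.any (fun ch => !(ch == '-' || ch == ':'))))) = rows
  by_cases hr : rows = []
  · simp [hr]
  · rw [if_neg hr, if_neg hr]
    obtain ⟨r0, rest, rfl⟩ : ∃ r0 rest, rows = r0 :: rest := by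
      rcases rows with _ | ⟨r0, rest⟩
      · exact absurd rfl hr
      · exact ⟨r0, rest, rfl⟩
    -- r0 is nonempty (the filter keeps only rows with a witnessing cell)
    have hr0 : r0 ≠ [] := by
      have hmem : r0 ∈ r0 :: rest := List.mem_cons_self
      rw [← hrows] at hmem
      have := List.of_mem_filter hmem
      rcases List.any_eq_true.1 this with ⟨c, hc, _⟩
      exact fun h => by simp [h] at hc
    set cc := (PySem.List.max? ((r0 :: rest).map (fun r => r.length)) (fun x => x)).getD 0 with hcc
    have hcc1 : 1 ≤ cc := by
      rw [hcc, List.map_cons, PySem.List.max?_id_cons, Option.getD_some]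
      have := (PySem.List.le_foldl_max (rest.map (fun r => r.length)) r0.length).1
      have hl : 1 ≤ r0.length := by
        rcases r0 with _ | _
        · exact absurd rfl hr0
        · simp
      omega
    have hle : ∀ r ∈ r0 :: rest, r.length ≤ cc := by
      intro r hr'
      rw [hcc, List.map_cons, PySem.List.max?_id_cons, Option.getD_some]
      have := PySem.List.max?_isMax (PySem.List.max?_id_cons r0.length (rest.map (fun r => r.length))) r.length
        (by rw [← List.map_cons]; exact List.mem_map_of_mem hr')
      simpa using this
    -- A's widths = the per-column fold, as a range-map
    rw [pv_WA_eq _ _ (by simpa using hle)]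
    simp only [List.length_replicate]
    have hW : (List.range cc).map (fun i =>
        List.foldl (fun a r => if i < r.length then max a ((r.getD i []).length) else a)
          ((List.replicate cc 0).getD i 0) (r0 :: rest))
      = ((List.range cc).map (fun i => List.map (fun r => if i < r.length then r.getD i [] else []) (r0 :: rest))).map
          (fun col => (PySem.List.max? (List.map (fun c => c.length) col) (fun x => x)).getD 0) := by
      rw [List.map_map]
      apply List.map_congr_left
      intro i hi
      rw [List.mem_range] at hi
      rw [List.getD_replicate _ hi]
      exact (pv_col_w r0 rest i).symm
    rw [hW]
    have hgetD : ∀ i, i < cc → ((List.map (fun col => (PySem.List.max? (List.map (fun c => c.length) col) (fun x => x)).getD 0)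
        (List.map (fun i => List.map (fun r => if i < r.length then r.getD i [] else []) (r0 :: rest)) (List.range cc))).getD i 0)
        = (PySem.List.max? (List.map (fun c => c.length) (List.map (fun r => if i < r.length then r.getD i [] else []) (r0 :: rest))) (fun x => x)).getD 0 := by
      intro i hi
      rw [List.map_map]
      exact PySem.List.getD_map_range _ cc i 0 hi
    simp only [PySem.List.foldl_append_singleton_eq_map, List.nil_append]
    rw [pv_formatted_concrete]
    -- B side: zip with the widths list, fuse the maps, transpose
    have hzip : ((List.range cc).map (fun i => List.map (fun r => if i < r.length then r.getD i [] else []) (r0 :: rest))).zip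
        (((List.range cc).map (fun i => List.map (fun r => if i < r.length then r.getD i [] else []) (r0 :: rest))).map
          (fun col => (PySem.List.max? (List.map (fun c => c.length) col) (fun x => x)).getD 0))
        = ((List.range cc).map (fun i => List.map (fun r => if i < r.length then r.getD i [] else []) (r0 :: rest))).map
          (fun c => (c, (PySem.List.max? (List.map (fun x => x.length) c) (fun x => x)).getD 0)) := by
      have := List.zip_map' (l := (List.range cc).map (fun i => List.map (fun r => if i < r.length then r.getD i [] else []) (r0 :: rest)))
        (f := fun c : List (List Char) => c)
        (g := fun col => (PySem.List.max? (List.map (fun c : List Char => c.length) col) (fun x => x)).getD 0)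
      simpa using this
    rw [hzip]
    have hpad : (((List.range cc).map (fun i => List.map (fun r => if i < r.length then r.getD i [] else []) (r0 :: rest))).map
          (fun c => (c, (PySem.List.max? (List.map (fun x => x.length) c) (fun x => x)).getD 0))).map
          (fun cw => cw.1.map (fun c => pvLjust c cw.2))
        = (List.range cc).map (fun i => (r0 :: rest).map (fun r =>
            pvLjust (if i < r.length then r.getD i [] else [])
              ((PySem.List.max? (List.map (fun c => c.length) (List.map (fun r => if i < r.length then r.getD i [] else []) (r0 :: rest))) (fun x => x)).getD 0))) := by
      rw [List.map_map, List.map_map]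
      apply List.map_congr_left
      intro i _
      simp [List.map_map]
    rw [hpad]
    rw [pv_transpose (List.range cc) (by simpa using Nat.pos_iff_ne_zero.mp hcc1) (r0 :: rest)
      (fun i r => pvLjust (if i < r.length then r.getD i [] else [])
        ((PySem.List.max? (List.map (fun c => c.length) (List.map (fun r => if i < r.length then r.getD i [] else []) (r0 :: rest))) (fun x => x)).getD 0))]
    simp only [List.map_cons, List.map_map, Function.comp_def]
    have hfix : ∀ r : List (List Char), List.map (fun x => pvLjust (if x < r.length then r.getD x [] else [])
          ((List.map (fun x => (PySem.List.max? ((if x < r0.length then r0.getD x [] else []).length ::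
              List.map (fun x_1 => (if x < x_1.length then x_1.getD x [] else []).length) rest) (fun x => x)).getD 0)
            (List.range cc)).getD x 0)) (List.range cc)
        = List.map (fun x => pvLjust (if x < r.length then r.getD x [] else [])
            ((PySem.List.max? ((if x < r0.length then r0.getD x [] else []).length ::
              List.map (fun x_1 => (if x < x_1.length then x_1.getD x [] else []).length) rest) (fun x => x)).getD 0)) (List.range cc) := by
      intro r
      apply List.map_congr_left
      intro i hi
      rw [PySem.List.getD_map_range _ cc i 0 (List.mem_range.1 hi)]
    simp only [hfix]

-- ---------- A's state machine = pvGo ----------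

theorem pv_go_eq (lines : List (List Char)) :
    (∀ res tl, (let st := lines.foldl (fun (st : List (List Char) × List (List Char) × Bool) line =>
        let stripped := PySem.Chars.strip line
        let is_table_line := PySem.Chars.startswith stripped ['|'] && PySem.Chars.endswith stripped ['|']
        if is_table_line then
          let table_lines := if !st.2.2 then [] else st.2.1
          (st.1, table_lines ++ [stripped], true)
        else
          if st.2.2 then (st.1 ++ [pvA_format st.2.1] ++ [line], [], false)
          else (st.1 ++ [line], st.2.1, false)) (res, tl, false)
      if st.2.2 then st.1 ++ [pvA_format st.2.1] else st.1) = res ++ pvGo lines)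
    ∧ (∀ res tl, (let st := lines.foldl (fun (st : List (List Char) × List (List Char) × Bool) line =>
        let stripped := PySem.Chars.strip line
        let is_table_line := PySem.Chars.startswith stripped ['|'] && PySem.Chars.endswith stripped ['|']
        if is_table_line then
          let table_lines := if !st.2.2 then [] else st.2.1
          (st.1, table_lines ++ [stripped], true)
        else
          if st.2.2 then (st.1 ++ [pvA_format st.2.1] ++ [line], [], false)
          else (st.1 ++ [line], st.2.1, false)) (res, tl, true)
      if st.2.2 then st.1 ++ [pvA_format st.2.1] else st.1)
      = res ++ pvB_format (tl ++ (pvRun lines).1.map PySem.Chars.strip) :: pvGo (pvRun lines).2) := by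
  induction lines with
  | nil =>
    constructor
    · intro res tl; simp [pvGo]
    · intro res tl; simp [pvGo, pvRun, ← pv_format_eq]
  | cons l ls ih =>
    obtain ⟨ih1, ih2⟩ := ih
    have hB : pvB_isRow l = (PySem.Chars.startswith (PySem.Chars.strip l) ['|'] && PySem.Chars.endswith (PySem.Chars.strip l) ['|']) := rfl
    constructor
    · intro res tl
      by_cases h : (PySem.Chars.startswith (PySem.Chars.strip l) ['|'] && PySem.Chars.endswith (PySem.Chars.strip l) ['|'])
      · simp only [List.foldl_cons, h, Bool.not_false, Bool.not_true, Bool.false_eq_true,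
          if_true, if_false, List.nil_append]
        refine (ih2 res [PySem.Chars.strip l]).trans ?_
        rw [pvGo, if_pos (hB.trans h)]
        simp
      · have h' : (PySem.Chars.startswith (PySem.Chars.strip l) ['|'] && PySem.Chars.endswith (PySem.Chars.strip l) ['|']) = false := by simpa using h
        simp only [List.foldl_cons, h', Bool.not_false, Bool.not_true, Bool.false_eq_true,
          if_true, if_false, List.nil_append]
        refine (ih1 (res ++ [l]) tl).trans ?_
        rw [pvGo, if_neg (by rw [hB, h']; simp)]
        simp
    · intro res tl
      by_cases h : (PySem.Chars.startswith (PySem.Chars.strip l) ['|'] && PySem.Chars.endswith (PySem.Chars.strip l) ['|'])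
      · simp only [List.foldl_cons, h, Bool.not_false, Bool.not_true, Bool.false_eq_true,
          if_true, if_false, List.nil_append]
        refine (ih2 res (tl ++ [PySem.Chars.strip l])).trans ?_
        rw [show pvRun (l :: ls) = (l :: (pvRun ls).1, (pvRun ls).2) from by
          rw [pvRun, if_pos (hB.trans h)]]
        simp
      · have h' : (PySem.Chars.startswith (PySem.Chars.strip l) ['|'] && PySem.Chars.endswith (PySem.Chars.strip l) ['|']) = false := by simpa using h
        simp only [List.foldl_cons, h', Bool.not_false, Bool.not_true, Bool.false_eq_true,
          if_true, if_false, List.nil_append]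
        refine (ih1 (res ++ [pvA_format tl] ++ [l]) []).trans ?_
        rw [show pvRun (l :: ls) = ([], l :: ls) from by
          rw [pvRun, if_neg (by rw [hB, h']; simp)]]
        rw [pvGo, if_neg (by rw [hB, h']; simp)]
        simp [pv_format_eq]

-- ---------- B's boundary/slice construction = pvGo ----------

def pvStitch (lines : List (List Char)) : List (Nat × Nat) → Nat → List (List Char)
  | [], prev => lines.drop prev
  | (s, e) :: ps, prev =>
    (lines.drop prev).take (s - prev)
      ++ pvB_format (((lines.drop s).take (e + 1 - s)).map PySem.Chars.strip)
      :: pvStitch lines ps (e + 1)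

theorem pv_foldl_stitch (lines : List (List Char)) :
    ∀ (ps : List (Nat × Nat)) (acc : List (List Char)) (prev : Nat),
    (let st := ps.foldl (fun (st : List (List Char) × Nat) se =>
        (st.1 ++ PySem.List.slice lines (some (st.2 : Int)) (some (se.1 : Int))
              ++ [pvB_format ((PySem.List.slice lines (some (se.1 : Int)) (some ((se.2 : Int) + 1))).map PySem.Chars.strip)],
         se.2 + 1)) (acc, prev)
     st.1 ++ PySem.List.slice lines (some (st.2 : Int)) none)
    = acc ++ pvStitch lines ps prev := by
  intro ps
  induction ps with
  | nil =>
    intro acc prev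
    simp only [List.foldl_nil, pvStitch, PySem.List.slice_from_natCast]
  | cons se ps ih =>
    intro acc prev
    obtain ⟨se1, se2⟩ := se
    simp only [List.foldl_cons]
    refine (ih _ (se2 + 1)).trans ?_
    simp only [pvStitch, PySem.List.slice_natCast]
    rw [show ((se2 : Int) + 1) = (((se2 + 1 : Nat)) : Int) from by push_cast; ring]
    rw [PySem.List.slice_natCast]
    simp

theorem pv_starts_false (fl : List Bool) :
    pvStarts (false :: fl) = (pvStarts fl).map (1 + ·) := by
  simp only [pvStarts, List.length_cons]
  rw [List.range_succ_eq_map, List.filter_cons]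
  simp only [List.getD_cons_zero, Bool.false_and, if_neg (by simp : ¬(false = true))]
  rw [show (List.map Nat.succ (List.range fl.length)) = List.map (1 + ·) (List.range fl.length) from by
    apply List.map_congr_left; intro i _; omega]
  rw [List.filter_map]
  congr 1
  apply List.filter_congr
  intro i _
  simp only [Function.comp_apply]
  rw [show 1 + i = i + 1 from by omega]
  simp only [List.getD_cons_succ, Nat.add_eq_zero, one_ne_zero, and_false,
    Nat.add_sub_cancel]
  cases i <;> simp

theorem pv_ends_false (fl : List Bool) :
    pvEnds (false :: fl) = (pvEnds fl).map (1 + ·) := by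
  simp only [pvEnds, List.length_cons]
  rw [List.range_succ_eq_map, List.filter_cons]
  simp only [List.getD_cons_zero, Bool.false_and, if_neg (by simp : ¬(false = true))]
  rw [show (List.map Nat.succ (List.range fl.length)) = List.map (1 + ·) (List.range fl.length) from by
    apply List.map_congr_left; intro i _; omega]
  rw [List.filter_map]
  congr 1
  apply List.filter_congr
  intro i hi
  simp only [Function.comp_apply]
  rw [show 1 + i = i + 1 from by omega]
  simp only [List.getD_cons_succ, Nat.add_sub_cancel]
  rw [show ((i + 1 : Nat) == fl.length) = (i == fl.length - 1) from by
    rw [Bool.eq_iff_iff]; simp only [beq_iff_eq]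
    have := List.mem_range.1 hi; omega]

theorem pv_getD_rep_lt (k i : Nat) (fl : List Bool) (h : i < k) :
    (List.replicate k true ++ fl).getD i false = true := by
  rw [List.getD, List.getElem?_append_left (by simpa using h)]
  simp [h]

theorem pv_getD_rep_ge (k i : Nat) (fl : List Bool) (h : k ≤ i) :
    (List.replicate k true ++ fl).getD i false = fl.getD (i - k) false := by
  rw [List.getD, List.getD, List.getElem?_append_right (by simpa using h)]
  simp

theorem pv_filter_eq_zero (k : Nat) (hk : 0 < k) :
    (List.range k).filter (fun i => i == 0) = [0] := by
  obtain ⟨k', rfl⟩ : ∃ k', k = k' + 1 := ⟨k - 1, by omega⟩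
  rw [List.range_succ_eq_map, List.filter_cons]
  simp only [if_pos (by simp : (0 == 0) = true)]
  rw [List.filter_eq_nil_iff.2 (by intro a ha; simp at ha; obtain ⟨b, _, rfl⟩ := ha; simp)]

theorem pv_filter_eq_pred (k : Nat) (hk : 0 < k) :
    (List.range k).filter (fun i => i == k - 1) = [k - 1] := by
  obtain ⟨k', rfl⟩ : ∃ k', k = k' + 1 := ⟨k - 1, by omega⟩
  rw [List.range_succ, List.filter_append, List.filter_cons]
  simp only [Nat.add_sub_cancel, if_pos (by simp : (k' == k') = true)]
  rw [List.filter_eq_nil_iff.2 (by intro a ha; simp at ha; simp; omega)]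
  simp

theorem pv_starts_run (k : Nat) (hk : 0 < k) (fl : List Bool) (hfl : fl.getD 0 false = false) :
    pvStarts (List.replicate k true ++ fl) = 0 :: (pvStarts fl).map (k + ·) := by
  simp only [pvStarts, List.length_append, List.length_replicate]
  rw [List.range_add, List.filter_append, List.filter_map]
  have h1 : (List.range k).filter (fun i =>
      (List.replicate k true ++ fl).getD i false && (i == 0 || !(List.replicate k true ++ fl).getD (i - 1) false))
      = [0] := by
    rw [← pv_filter_eq_zero k hk]
    apply List.filter_congr
    intro i hi
    have hik := List.mem_range.1 hi
    rw [pv_getD_rep_lt k i fl hik, Bool.true_and]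
    rcases Nat.eq_zero_or_pos i with rfl | hpos
    · simp
    · rw [pv_getD_rep_lt k (i - 1) fl (by omega)]
      simp only [Bool.not_true, Bool.or_false]
  have h2 : (List.range fl.length).filter ((fun i =>
      (List.replicate k true ++ fl).getD i false && (i == 0 || !(List.replicate k true ++ fl).getD (i - 1) false)) ∘ (fun x => k + x))
      = (List.range fl.length).filter (fun i => fl.getD i false && (i == 0 || !fl.getD (i - 1) false)) := by
    apply List.filter_congr
    intro j _
    simp only [Function.comp_apply]
    rw [pv_getD_rep_ge k (k + j) fl (by omega), show k + j - k = j from by omega]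
    rw [show ((k + j : Nat) == 0) = false from by simp only [beq_eq_false_iff_ne, ne_eq]; omega]
    rcases Nat.eq_zero_or_pos j with rfl | hpos
    · rw [pv_getD_rep_lt k (k + 0 - 1) fl (by omega), hfl]
      simp
    · rw [show k + j - 1 = k + (j - 1) from by omega,
        pv_getD_rep_ge k (k + (j - 1)) fl (by omega), show k + (j - 1) - k = j - 1 from by omega]
      rw [show (j == 0) = false from by simp only [beq_eq_false_iff_ne, ne_eq]; omega]
  rw [h1, h2]
  simp

theorem pv_ends_run (k : Nat) (hk : 0 < k) (fl : List Bool) (hfl : fl.getD 0 false = false) :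
    pvEnds (List.replicate k true ++ fl) = (k - 1) :: (pvEnds fl).map (k + ·) := by
  simp only [pvEnds, List.length_append, List.length_replicate]
  rw [List.range_add, List.filter_append, List.filter_map]
  have h1 : (List.range k).filter (fun i =>
      (List.replicate k true ++ fl).getD i false && (i == k + fl.length - 1 || !(List.replicate k true ++ fl).getD (i + 1) false))
      = [k - 1] := by
    rw [← pv_filter_eq_pred k hk]
    apply List.filter_congr
    intro i hi
    have hik := List.mem_range.1 hi
    rw [pv_getD_rep_lt k i fl hik, Bool.true_and]
    rcases Nat.lt_or_ge i (k - 1) with hlt | hge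
    · rw [pv_getD_rep_lt k (i + 1) fl (by omega)]
      simp only [Bool.not_true, Bool.or_false]
      rw [show (i == k + fl.length - 1) = false from by simp; omega,
        show (i == k - 1) = false from by simp only [beq_eq_false_iff_ne, ne_eq]; omega]

    · have hieq : i = k - 1 := by omega
      subst hieq
      rcases Nat.eq_zero_or_pos fl.length with hm | hm
      · rw [show ((k - 1 : Nat) == k + fl.length - 1) = true from by simp only [beq_iff_eq]; omega]
        simp
      · rw [pv_getD_rep_ge k (k - 1 + 1) fl (by omega), show k - 1 + 1 - k = 0 from by omega, hfl]
        simp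
  have h2 : (List.range fl.length).filter ((fun i =>
      (List.replicate k true ++ fl).getD i false && (i == k + fl.length - 1 || !(List.replicate k true ++ fl).getD (i + 1) false)) ∘ (fun x => k + x))
      = (List.range fl.length).filter (fun i => fl.getD i false && (i == fl.length - 1 || !fl.getD (i + 1) false)) := by
    apply List.filter_congr
    intro j hj
    have hjm := List.mem_range.1 hj
    simp only [Function.comp_apply]
    rw [pv_getD_rep_ge k (k + j) fl (by omega), show k + j - k = j from by omega]
    rw [show (k + j + 1) = k + (j + 1) from by omega,
      pv_getD_rep_ge k (k + (j + 1)) fl (by omega), show k + (j + 1) - k = j + 1 from by omega]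
    rw [show ((k + j : Nat) == k + fl.length - 1) = (j == fl.length - 1) from by
      rw [Bool.eq_iff_iff]; simp only [beq_iff_eq]; omega]
  rw [h1, h2]
  simp

theorem pv_stitch_shift (pre rest : List (List Char)) :
    ∀ (ps : List (Nat × Nat)) (prev : Nat),
    pvStitch (pre ++ rest) (ps.map (fun se => (pre.length + se.1, pre.length + se.2))) (pre.length + prev)
    = pvStitch rest ps prev := by
  intro ps
  induction ps with
  | nil => intro prev; simp [pvStitch, List.drop_length_add_append]
  | cons se ps ih =>
    intro prev
    obtain ⟨s, e⟩ := se
    simp only [List.map_cons, pvStitch, List.drop_length_add_append]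
    rw [show pre.length + s - (pre.length + prev) = s - prev from by omega]
    rw [show pre.length + e + 1 - (pre.length + s) = e + 1 - s from by omega]
    rw [show pre.length + e + 1 = pre.length + (e + 1) from by omega]
    rw [ih (e + 1)]

theorem pv_stitch_cons_false (l : List Char) (ls : List (List Char)) :
    ∀ (ps : List (Nat × Nat)),
    pvStitch (l :: ls) (ps.map (fun se => (1 + se.1, 1 + se.2))) 0 = l :: pvStitch ls ps 0 := by
  intro ps
  cases ps with
  | nil => simp [pvStitch]
  | cons se ps =>
    obtain ⟨s, e⟩ := se
    simp only [List.map_cons, pvStitch, List.drop_zero]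
    rw [show (1 + s - 0) = s + 1 from by omega]
    rw [show (l :: ls).take (s + 1) = l :: ls.take s from by simp]
    rw [show (l :: ls).drop (1 + s) = ls.drop s from by simp [Nat.add_comm]]
    rw [show 1 + e + 1 - (1 + s) = e + 1 - s from by omega]
    have := pv_stitch_shift [l] ls ps (e + 1)
    simp only [List.length_cons, List.length_nil, List.singleton_append] at this
    rw [show 1 + e + 1 = 1 + (e + 1) from by omega, this]
    simp

theorem pv_stitch_go_aux : ∀ (n : Nat) (lines : List (List Char)), lines.length ≤ n →
    pvStitch lines ((pvStarts (lines.map pvB_isRow)).zip (pvEnds (lines.map pvB_isRow))) 0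
    = pvGo lines := by
  intro n
  induction n with
  | zero =>
    intro lines h
    have hnil : lines = [] := List.length_eq_zero_iff.1 (by omega)
    subst hnil
    simp [pvStarts, pvEnds, pvStitch, pvGo]
  | succ n ih =>
    intro lines hlen
    match lines with
    | [] => simp [pvStarts, pvEnds, pvStitch, pvGo]
    | l :: ls =>
      by_cases hrow : pvB_isRow l = true
      · -- a table run starts here
        have hsplit : l :: ls = (l :: (pvRun ls).1) ++ (pvRun ls).2 := by
          rw [List.cons_append, pvRun_append]
        have hk : 0 < (l :: (pvRun ls).1).length := by simp
        have hmap : (l :: ls).map pvB_isRow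
            = List.replicate (l :: (pvRun ls).1).length true ++ ((pvRun ls).2.map pvB_isRow) := by
          conv_lhs => rw [hsplit]
          rw [List.map_append]
          congr 1
          rw [List.eq_replicate_iff]
          refine ⟨by simp, ?_⟩
          intro b hb
          rcases List.mem_map.1 hb with ⟨x, hx, rfl⟩
          rcases List.mem_cons.1 hx with rfl | hx
          · exact hrow
          · exact pvRun_all ls x hx
        rw [hmap, pv_starts_run _ hk _ (pvRun_head ls), pv_ends_run _ hk _ (pvRun_head ls)]
        rw [List.zip_cons_cons, List.zip_map]
        simp only [pvStitch, List.drop_zero, Nat.sub_zero, List.take_zero, List.nil_append,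
          Nat.sub_add_cancel (by omega : 1 ≤ (l :: (pvRun ls).1).length)]
        rw [show (l :: ls).take (l :: (pvRun ls).1).length = l :: (pvRun ls).1 from by
          conv_lhs => rw [hsplit]
          exact List.take_left]
        have hshift := pv_stitch_shift (l :: (pvRun ls).1) (pvRun ls).2
          ((pvStarts ((pvRun ls).2.map pvB_isRow)).zip (pvEnds ((pvRun ls).2.map pvB_isRow))) 0
        rw [Nat.add_zero] at hshift
        have hmapfun : List.map (Prod.map (fun x => (l :: (pvRun ls).1).length + x) (fun x => (l :: (pvRun ls).1).length + x))
              ((pvStarts ((pvRun ls).2.map pvB_isRow)).zip (pvEnds ((pvRun ls).2.map pvB_isRow)))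
            = List.map (fun se => ((l :: (pvRun ls).1).length + se.1, (l :: (pvRun ls).1).length + se.2))
              ((pvStarts ((pvRun ls).2.map pvB_isRow)).zip (pvEnds ((pvRun ls).2.map pvB_isRow))) := by
          apply List.map_congr_left
          intro se _
          rfl
        conv_lhs => rw [hsplit, hmapfun, hshift]
        rw [ih _ (by
          have h1 := pvRun_rest_le ls
          have h2 : ls.length ≤ n := by simpa using Nat.succ_le_succ_iff.mp (by simpa using hlen)
          omega)]
        rw [pvGo, if_pos hrow]
      · -- an ordinary line
        have hrow' : pvB_isRow l = false := by simpa using hrow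
        rw [show (l :: ls).map pvB_isRow = false :: ls.map pvB_isRow from by simp [hrow']]
        rw [pv_starts_false, pv_ends_false, List.zip_map]
        rw [show List.map (Prod.map (fun x => 1 + x) (fun x => 1 + x))
              ((pvStarts (ls.map pvB_isRow)).zip (pvEnds (ls.map pvB_isRow)))
            = List.map (fun se => (1 + se.1, 1 + se.2))
              ((pvStarts (ls.map pvB_isRow)).zip (pvEnds (ls.map pvB_isRow))) from by
          apply List.map_congr_left; intro se _; rfl]
        rw [pv_stitch_cons_false]
        rw [ih ls (by simpa using Nat.succ_le_succ_iff.mp (by simpa using hlen))]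
        rw [pvGo, if_neg (by simp [hrow'])]

theorem pv_stitch_go (lines : List (List Char)) :
    pvStitch lines ((pvStarts (lines.map pvB_isRow)).zip (pvEnds (lines.map pvB_isRow))) 0
    = pvGo lines :=
  pv_stitch_go_aux lines.length lines (Nat.le_refl _)

-- ===== VERDICT (by name: the statement is the Claim_ definition above) =====
theorem convert_md_tables_to_code_blocks_py_spec : Claim_equal_convert_md_tables_to_code_blocks_py := by
  intro text _
  show _ = _
  unfold convert_md_tables_to_code_blocks_py convert_md_tables_to_code_blocks_py_alt
  have hA := (pv_go_eq (PySem.Chars.splitOn text.toList ['\n'])).1 [] []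
  have hB := pv_foldl_stitch (PySem.Chars.splitOn text.toList ['\n'])
    ((pvStarts ((PySem.Chars.splitOn text.toList ['\n']).map pvB_isRow)).zip
      (pvEnds ((PySem.Chars.splitOn text.toList ['\n']).map pvB_isRow))) [] 0
  simp only at hA hB ⊢
  rw [hA, hB, pv_stitch_go]
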